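-- pv_equiv track=rewrite | github.com/ryandakine/MultiSportsBettingPlatform | archive/integrated_parlay_system.py | _select_diversified_picks
-- ===== SOURCE A (Python) =====
-- from typing import Dict, Any, List, Optional
--
-- def _select_diversified_picks(picks: List[Dict[str, Any]], num_teams: int) -> List[Dict[str, Any]]:
--     """Select diversified picks for value parlays"""
--     if len(picks) <= num_teams:
--         return picks
--
--     # Select picks from different conferences/divisions
--     selected = []
--     conferences = set()
--     divisions = set()
--
--     for pick in picks:
--         if len(selected) >= num_teams:
--             break
--
--         pick_conf = pick.get("conference", "")
--         pick_div = pick.get("division", "")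
--
--         # Prefer picks from different conferences/divisions
--         if pick_conf not in conferences or pick_div not in divisions:
--             selected.append(pick)
--             conferences.add(pick_conf)
--             divisions.add(pick_div)
--
--     # Fill remaining slots
--     while len(selected) < num_teams and picks:
--         remaining = [p for p in picks if p not in selected]
--         if remaining:
--             selected.append(remaining[0])
--         else:
--             break
--
--     return selected[:num_teams]
-- ===== SOURCE B (Python) =====
-- from typing import Dict, Any, List
--
-- def _select_diversified_picks(picks: List[Dict[str, Any]], num_teams: int) -> List[Dict[str, Any]]:
--     """Select diversified picks: one pass for the diversity phase, one pass for the fill phase."""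
--     if len(picks) <= num_teams:
--         return picks
--
--     selected = []
--     conferences = set()
--     divisions = set()
--
--     # Diversity pass: no break, a capacity guard per element (equivalent, since
--     # once the cap is hit nothing is ever appended again).
--     for pick in picks:
--         if len(selected) < num_teams:
--             conf = pick.get("conference", "")
--             div = pick.get("division", "")
--             if conf not in conferences or div not in divisions:
--                 selected.append(pick)
--                 conferences.add(conf)
--                 divisions.add(div)
--
--     # Fill pass: a single forward scan instead of repeatedly rebuilding the
--     # 'remaining' list; skipped picks are appended in first-occurrence order.
--     for p in picks:
--         if len(selected) < num_teams and p not in selected: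
--             selected.append(p)
--
--     return selected
-- ===== Notes on version B (the rewrite author's own statement) =====
-- stated objective: simpler
-- what changed: The break-based diversity loop becomes a guarded single fold, and the fill phase's while-loop that rebuilds 'remaining = [p for p in picks if p not in selected]' on every iteration becomes one forward scan over picks appending each not-yet-selected pick; the final defensive slice is dropped since the scans never exceed num_teams.
import Mathlib
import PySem

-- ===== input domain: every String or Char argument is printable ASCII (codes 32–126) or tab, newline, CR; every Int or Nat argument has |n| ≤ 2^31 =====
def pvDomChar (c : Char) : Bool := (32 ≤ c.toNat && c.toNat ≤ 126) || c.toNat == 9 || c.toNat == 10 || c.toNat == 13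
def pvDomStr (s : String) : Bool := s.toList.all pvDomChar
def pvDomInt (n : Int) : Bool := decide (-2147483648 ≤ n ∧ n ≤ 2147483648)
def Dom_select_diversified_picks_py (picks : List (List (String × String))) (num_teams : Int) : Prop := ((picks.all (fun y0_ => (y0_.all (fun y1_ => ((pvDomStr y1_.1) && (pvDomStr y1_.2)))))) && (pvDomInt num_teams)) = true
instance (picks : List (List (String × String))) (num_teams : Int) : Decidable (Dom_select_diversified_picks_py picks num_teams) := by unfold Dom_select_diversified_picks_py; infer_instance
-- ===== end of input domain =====

-- B replaces A's break-based diversity loop by a guarded fold and A's while-loop fill phase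
-- (which rebuilds the 'remaining' list each iteration) by one forward scan; objective: simpler.

-- ===== PORT A =====
-- pick.get(key, "")  — a pick is a Python dict, modelled as its item list
def pickGet (p : List (String × String)) (k : String) : String :=
  (PySem.Dict.ofList p).getD k ""

-- Python dict equality (order-insensitive): same size and every key maps to the same value
def pickEq (a b : List (String × String)) : Bool :=
  let da := PySem.Dict.ofList a
  let db := PySem.Dict.ofList b
  da.size == db.size && da.keys.all (fun k => da.get? k == db.get? k)

-- Python 'p in selected' (list membership by dict equality)
def pickMem (p : List (String × String)) (sel : List (List (String × String))) : Bool :=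
  sel.any (fun q => pickEq q p)

-- A's first loop: 'for pick in picks: if len(selected) >= num_teams: break; …'
def selA_loop1 (picks : List (List (String × String))) (k : Int)
    (sel : List (List (String × String))) (confs divs : PySem.Set String) :
    List (List (String × String)) :=
  match picks with
  | [] => sel
  | pick :: rest =>
    if k ≤ (sel.length : Int) then sel
    else
      let c := pickGet pick "conference"
      let d := pickGet pick "division"
      if !confs.contains c || !divs.contains d then
        selA_loop1 rest k (sel ++ [pick]) (confs.add c) (divs.add d)
      else
        selA_loop1 rest k sel confs divs

-- pickEq is reflexive (needed for termination of A's while loop)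
theorem pickEq_refl (a : List (String × String)) : pickEq a a = true := by
  simp [pickEq]

theorem pickMem_append (p r : List (String × String))
    (sel : List (List (String × String))) :
    pickMem p (sel ++ [r]) = (pickMem p sel || pickEq r p) := by
  simp [pickMem]

-- the measure of A's while loop strictly decreases when the head of 'remaining' is appended
theorem fill_measure_lt (picks : List (List (String × String)))
    (sel : List (List (String × String))) (r : List (String × String))
    (t : List (List (String × String)))
    (hr : picks.filter (fun p => !pickMem p sel) = r :: t) :
    (picks.filter (fun p => !pickMem p (sel ++ [r]))).length <
      (picks.filter (fun p => !pickMem p sel)).length := by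
  have hsub : picks.filter (fun p => !pickMem p (sel ++ [r]))
      = (picks.filter (fun p => !pickMem p sel)).filter (fun p => !pickEq r p) := by
    rw [List.filter_filter]
    apply List.filter_congr
    intro p _
    simp only [pickMem_append, Bool.not_or]
    rw [Bool.and_comm]
  rw [hsub, hr]
  simp [pickEq_refl]
  exact List.length_filter_le _ _

-- A's second loop: 'while len(selected) < num_teams and picks: remaining = […]; …'
def selA_fill (picks : List (List (String × String))) (k : Int)
    (sel : List (List (String × String))) : List (List (String × String)) :=
  if _h : (sel.length : Int) < k ∧ picks ≠ [] then
    match _hr : picks.filter (fun p => !pickMem p sel) with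
    | [] => sel
    | r :: _ => selA_fill picks k (sel ++ [r])
  else sel
termination_by (picks.filter (fun p => !pickMem p sel)).length
decreasing_by
  exact fill_measure_lt picks sel r _ _hr

def select_diversified_picks_py (picks : List (List (String × String))) (num_teams : Int) :
    List (List (String × String)) :=
  if (picks.length : Int) ≤ num_teams then picks
  else
    let sel := selA_loop1 picks num_teams [] PySem.Set.empty PySem.Set.empty
    let sel := selA_fill picks num_teams sel
    PySem.List.slice sel none (some num_teams)

-- ===== PORT B =====
-- B's first loop body: capacity guard per element, no break
def selB_step1 (k : Int)
    (st : List (List (String × String)) × PySem.Set String × PySem.Set String)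
    (pick : List (String × String)) :
    List (List (String × String)) × PySem.Set String × PySem.Set String :=
  if (st.1.length : Int) < k then
    let c := pickGet pick "conference"
    let d := pickGet pick "division"
    if !st.2.1.contains c || !st.2.2.contains d then
      (st.1 ++ [pick], st.2.1.add c, st.2.2.add d)
    else st
  else st

-- B's fill loop body: one forward scan, append when capacity remains and not yet selected
def selB_fillStep (k : Int) (sel : List (List (String × String)))
    (p : List (String × String)) : List (List (String × String)) :=
  if (sel.length : Int) < k && !pickMem p sel then sel ++ [p] else sel

def select_diversified_picks_py_alt (picks : List (List (String × String))) (num_teams : Int) :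
    List (List (String × String)) :=
  if (picks.length : Int) ≤ num_teams then picks
  else
    let st := picks.foldl (selB_step1 num_teams) ([], PySem.Set.empty, PySem.Set.empty)
    picks.foldl (selB_fillStep num_teams) st.1

-- ===== PRECONDITION & SPEC =====
def Spec_select_diversified_picks_py (picks : List (List (String × String))) (num_teams : Int) (out : List (List (String × String))) : Prop := out = select_diversified_picks_py_alt picks num_teams
instance (picks : List (List (String × String))) (num_teams : Int) (out : List (List (String × String))) : Decidable (Spec_select_diversified_picks_py picks num_teams out) := by unfold Spec_select_diversified_picks_py; infer_instance

-- ===== CLAIM (what is proved, stated in full; the proofs are below) =====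
def Claim_equal_select_diversified_picks_py : Prop := ∀ (picks : List (List (String × String))) (num_teams : Int), Dom_select_diversified_picks_py picks num_teams → Spec_select_diversified_picks_py picks num_teams (select_diversified_picks_py picks num_teams)

-- ===== LEMMAS AND PROOFS =====

theorem pickMem_append_self (p : List (String × String))
    (sel : List (List (String × String))) : pickMem p (sel ++ [p]) = true := by
  simp [pickMem, pickEq_refl]

-- once the state is at capacity, B's first fold leaves it untouched
theorem selB_fold1_const (k : Int) (l : List (List (String × String)))
    (st : List (List (String × String)) × PySem.Set String × PySem.Set String)
    (h : ¬ (st.1.length : Int) < k) :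
    l.foldl (selB_step1 k) st = st := by
  induction l with
  | nil => rfl
  | cons p rest ih => simp [List.foldl_cons, selB_step1, h, ih]

-- A's breaking loop equals B's guarded fold (first component of the state)
theorem loop1_eq_fold (picks : List (List (String × String))) (k : Int) :
    ∀ (sel : List (List (String × String))) (confs divs : PySem.Set String),
      selA_loop1 picks k sel confs divs =
        (picks.foldl (selB_step1 k) (sel, confs, divs)).1 := by
  induction picks with
  | nil => intro sel confs divs; rfl
  | cons pick rest ih =>
    intro sel confs divs
    by_cases hk : k ≤ (sel.length : Int)
    · have hk' : ¬ (sel.length : Int) < k := by omega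
      have hstep : selB_step1 k (sel, confs, divs) pick = (sel, confs, divs) := by
        simp only [selB_step1]
        rw [if_neg hk']
      rw [List.foldl_cons, hstep, selB_fold1_const k rest (sel, confs, divs) hk']
      simp [selA_loop1, hk]
    · have hk' : (sel.length : Int) < k := by omega
      rw [List.foldl_cons]
      by_cases hc : (!PySem.Set.contains confs (pickGet pick "conference")
          || !PySem.Set.contains divs (pickGet pick "division")) = true
      · have hstep : selB_step1 k (sel, confs, divs) pick
            = (sel ++ [pick], confs.add (pickGet pick "conference"),
                divs.add (pickGet pick "division")) := by
          simp only [selB_step1]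
          rw [if_pos hk', if_pos hc]
        rw [hstep]
        simp only [selA_loop1]
        rw [if_neg hk, if_pos hc]
        exact ih _ _ _
      · have hstep : selB_step1 k (sel, confs, divs) pick = (sel, confs, divs) := by
          simp only [selB_step1]
          rw [if_pos hk', if_neg hc]
        rw [hstep]
        simp only [selA_loop1]
        rw [if_neg hk, if_neg hc]
        exact ih _ _ _

-- reduction lemmas for A's while loop
theorem fill_of_not_lt (picks : List (List (String × String))) (k : Int)
    (sel : List (List (String × String))) (hk : ¬ (sel.length : Int) < k) :
    selA_fill picks k sel = sel := by
  rw [selA_fill]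
  simp [hk]

theorem fill_of_filter_nil (picks : List (List (String × String))) (k : Int)
    (sel : List (List (String × String)))
    (hfil : picks.filter (fun p => !pickMem p sel) = []) :
    selA_fill picks k sel = sel := by
  rw [selA_fill]
  split
  · split
    · rfl
    · rename_i hx
      rw [hfil] at hx
      simp at hx
  · rfl

theorem fill_step (picks : List (List (String × String))) (k : Int)
    (sel : List (List (String × String))) (r : List (String × String))
    (t : List (List (String × String)))
    (hk : (sel.length : Int) < k) (hne : picks ≠ [])
    (hfil : picks.filter (fun p => !pickMem p sel) = r :: t) :
    selA_fill picks k sel = selA_fill picks k (sel ++ [r]) := by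
  rw [selA_fill, dif_pos ⟨hk, hne⟩]
  split
  · rename_i hx
    rw [hfil] at hx
    simp at hx
  · rename_i r' t' hx
    rw [hfil] at hx
    cases hx
    rfl

-- an already-selected head is a no-op for A's while loop
theorem fill_skip (k : Int) (p : List (String × String)) (rest : List (List (String × String))) :
    ∀ n (sel : List (List (String × String))),
      (rest.filter (fun q => !pickMem q sel)).length = n →
      pickMem p sel = true →
      selA_fill (p :: rest) k sel = selA_fill rest k sel := by
  intro n
  induction n using Nat.strong_induction_on with
  | _ n ih =>
    intro sel hn hmem
    by_cases hk : (sel.length : Int) < k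
    · have hfc : (p :: rest).filter (fun q => !pickMem q sel)
          = rest.filter (fun q => !pickMem q sel) := by
        simp [hmem]
      cases hr : rest.filter (fun q => !pickMem q sel) with
      | nil =>
        rw [fill_of_filter_nil _ _ _ (hfc.trans hr), fill_of_filter_nil _ _ _ hr]
      | cons r t =>
        have hrne : rest ≠ [] := by
          intro he; rw [he] at hr; simp at hr
        rw [fill_step (p :: rest) k sel r t hk (by simp) (hfc.trans hr),
            fill_step rest k sel r t hk hrne hr]
        have hmem' : pickMem p (sel ++ [r]) = true := by
          rw [pickMem_append, hmem]; rfl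
        have hlt : (rest.filter (fun q => !pickMem q (sel ++ [r]))).length < n := by
          rw [← hn]; exact fill_measure_lt rest sel r t hr
        exact ih _ hlt (sel ++ [r]) rfl hmem'
    · rw [fill_of_not_lt _ _ _ hk, fill_of_not_lt _ _ _ hk]

-- once at capacity, B's fill fold is the identity
theorem selB_fillFold_const (k : Int) (l : List (List (String × String)))
    (sel : List (List (String × String))) (h : ¬ (sel.length : Int) < k) :
    l.foldl (selB_fillStep k) sel = sel := by
  induction l with
  | nil => rfl
  | cons p rest ih => simp [List.foldl_cons, selB_fillStep, h, ih]

-- A's while loop equals B's forward scan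
theorem fill_eq_fold (k : Int) (picks : List (List (String × String))) :
    ∀ (sel : List (List (String × String))),
      selA_fill picks k sel = picks.foldl (selB_fillStep k) sel := by
  induction picks with
  | nil => intro sel; rw [selA_fill]; simp
  | cons p rest ih =>
    intro sel
    by_cases hk : (sel.length : Int) < k
    · by_cases hm : pickMem p sel = true
      · rw [fill_skip k p rest _ sel rfl hm, List.foldl_cons]
        have : selB_fillStep k sel p = sel := by simp [selB_fillStep, hm]
        rw [this, ih]
      · have hm' : pickMem p sel = false := by revert hm; cases pickMem p sel <;> simp
        have hfc : (p :: rest).filter (fun q => !pickMem q sel)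
            = p :: rest.filter (fun q => !pickMem q sel) := by
          simp [hm']
        rw [fill_step (p :: rest) k sel p _ hk (by simp) hfc,
            fill_skip k p rest _ (sel ++ [p]) rfl (pickMem_append_self p sel)]
        rw [List.foldl_cons]
        have : selB_fillStep k sel p = sel ++ [p] := by simp [selB_fillStep, hk, hm']
        rw [this, ih]
    · rw [fill_of_not_lt _ _ _ hk, selB_fillFold_const k (p :: rest) sel hk]

-- length bound for B's first fold
theorem selB_fold1_len (k : Int) (l : List (List (String × String))) :
    ∀ st, ((l.foldl (selB_step1 k) st).1.length : Int) ≤ max k (st.1.length : Int) := by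
  induction l with
  | nil => intro st; simp
  | cons p rest ih =>
    intro st
    rw [List.foldl_cons]
    refine le_trans (ih _) ?_
    simp only [selB_step1]
    split
    · split
      · simp only []
        rename_i hlt _
        have : ((st.1 ++ [p]).length : Int) ≤ k := by simp; omega
        omega
      · exact le_rfl
    · exact le_rfl

-- length bound for B's fill fold
theorem selB_fillFold_len (k : Int) (l : List (List (String × String))) :
    ∀ sel, ((l.foldl (selB_fillStep k) sel).length : Int) ≤ max k (sel.length : Int) := by
  induction l with
  | nil => intro sel; simp
  | cons p rest ih =>
    intro sel
    rw [List.foldl_cons]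
    refine le_trans (ih _) ?_
    simp only [selB_fillStep]
    split
    · rename_i h
      have hlt : (sel.length : Int) < k := by
        rcases Bool.and_eq_true_iff.mp h with ⟨h1, _⟩
        simpa using of_decide_eq_true (by simpa using h1)
      have : ((sel ++ [p]).length : Int) ≤ k := by simp; omega
      omega
    · exact le_rfl

-- ===== VERDICT (by name: the statement is the Claim_ definition above) =====
theorem select_diversified_picks_py_spec : Claim_equal_select_diversified_picks_py := by
  intro picks num_teams _
  unfold Spec_select_diversified_picks_py
  unfold select_diversified_picks_py select_diversified_picks_py_alt
  by_cases hb : (picks.length : Int) ≤ num_teams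
  · simp [hb]
  · simp only [hb, if_false]
    rw [loop1_eq_fold, fill_eq_fold]
    set st := picks.foldl (selB_step1 num_teams) ([], PySem.Set.empty, PySem.Set.empty) with hst
    set F := picks.foldl (selB_fillStep num_teams) st.1 with hF
    have h1 : ((st.1.length : Int)) ≤ max num_teams 0 := by
      simpa using selB_fold1_len num_teams picks ([], PySem.Set.empty, PySem.Set.empty)
    have h2 : ((F.length : Int)) ≤ max num_teams 0 := by
      refine le_trans (selB_fillFold_len num_teams picks st.1) ?_
      omega
    by_cases hk : 0 ≤ num_teams
    · have hle : (F.length : Int) ≤ num_teams := by omega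
      rw [PySem.List.slice_to F hk]
      exact List.take_of_length_le (by omega)
    · have : F.length = 0 := by omega
      have hFnil : F = [] := List.eq_nil_of_length_eq_zero this
      rw [hFnil]
      simp [PySem.List.slice]
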